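-- pv_equiv track=rewrite | github.com/meggert9/PencilDurabilityKata | Paper.py | _replace_partial_text_with_spaces
-- ===== SOURCE A (Python) =====
-- def _replace_partial_text_with_spaces(text_to_replace, num_characters_to_replace):
--     final_text = []
--     reversed_text_to_replace = reversed(text_to_replace)
--     for i, character in enumerate(reversed_text_to_replace):
--         if character not in ['\n', ' '] and num_characters_to_replace > 0:
--             final_text.append(' ')
--             num_characters_to_replace -= 1
--         else:
--             final_text.append(character)
--
--     final_text = reversed(final_text)
--     final_text = ''.join(final_text)
--     return final_text
-- ===== SOURCE B (Python) =====
-- def _replace_partial_text_with_spaces(text_to_replace, num_characters_to_replace):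
--     idxs = [i for i, c in enumerate(text_to_replace) if c != ' ' and c != '\n']
--     if num_characters_to_replace > 0:
--         blank = set(idxs[-num_characters_to_replace:])
--     else:
--         blank = set()
--     return ''.join(' ' if i in blank else c for i, c in enumerate(text_to_replace))
-- ===== Notes on version B (the rewrite author's own statement) =====
-- stated objective: simpler
-- what changed: Replaces A's reverse walk with a mutable countdown (build reversed output, reverse back) by an index-table decomposition: collect the indices of non-space characters, take the trailing slice of length N as a blank set, and emit the result in one forward pass.
import Mathlib
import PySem

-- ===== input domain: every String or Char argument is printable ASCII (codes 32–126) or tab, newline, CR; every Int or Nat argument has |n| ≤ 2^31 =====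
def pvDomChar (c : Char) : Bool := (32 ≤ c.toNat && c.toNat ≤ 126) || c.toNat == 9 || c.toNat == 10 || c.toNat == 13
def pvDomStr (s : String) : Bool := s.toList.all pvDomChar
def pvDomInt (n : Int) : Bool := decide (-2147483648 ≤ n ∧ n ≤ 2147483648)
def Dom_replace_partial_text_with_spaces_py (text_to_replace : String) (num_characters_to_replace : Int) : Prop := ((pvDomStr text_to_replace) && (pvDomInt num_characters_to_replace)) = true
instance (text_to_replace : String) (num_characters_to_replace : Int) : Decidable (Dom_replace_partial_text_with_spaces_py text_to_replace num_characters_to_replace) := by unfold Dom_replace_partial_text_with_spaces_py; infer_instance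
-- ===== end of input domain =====

-- B replaces A's reverse walk with a live counter by an index-table-then-forward-pass
-- decomposition (collect non-space indices, blank the trailing slice); objective: simpler.

-- ===== PORT A =====
-- the loop body of A (the if/else inside the for, state = (num_characters_to_replace, final_text))
def pvStepA (st : Int × List Char) (character : Char) : Int × List Char :=
  if (¬ (character = '\n' ∨ character = ' ')) ∧ st.1 > 0 then
    (st.1 - 1, st.2 ++ [' '])
  else
    (st.1, st.2 ++ [character])

def replace_partial_text_with_spaces_py (text_to_replace : String) (num_characters_to_replace : Int) : String :=
  let final_text := (text_to_replace.toList.reverse.foldl pvStepA (num_characters_to_replace, [])).2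
  String.ofList final_text.reverse

-- ===== PORT B =====
def replace_partial_text_with_spaces_py_alt (text_to_replace : String) (num_characters_to_replace : Int) : String :=
  let l := text_to_replace.toList
  let idxs : List Int := (PySem.List.enumerate l 0).filterMap
    (fun p => if p.2 ≠ ' ' ∧ p.2 ≠ '\n' then some p.1 else none)
  let blank : PySem.Set Int :=
    if num_characters_to_replace > 0 then
      PySem.Set.ofList (PySem.List.slice idxs (some (-num_characters_to_replace)) none)
    else
      PySem.Set.empty
  String.ofList ((PySem.List.enumerate l 0).map (fun p => if p.1 ∈ blank then ' ' else p.2))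

-- ===== PRECONDITION & SPEC =====
def Spec_replace_partial_text_with_spaces_py (text_to_replace : String) (num_characters_to_replace : Int) (out : String) : Prop := out = replace_partial_text_with_spaces_py_alt text_to_replace num_characters_to_replace
instance (text_to_replace : String) (num_characters_to_replace : Int) (out : String) : Decidable (Spec_replace_partial_text_with_spaces_py text_to_replace num_characters_to_replace out) := by unfold Spec_replace_partial_text_with_spaces_py; infer_instance

-- ===== CLAIM (what is proved, stated in full; the proofs are below) =====
def Claim_equal_replace_partial_text_with_spaces_py : Prop := ∀ (text_to_replace : String) (num_characters_to_replace : Int), Dom_replace_partial_text_with_spaces_py text_to_replace num_characters_to_replace → Spec_replace_partial_text_with_spaces_py text_to_replace num_characters_to_replace (replace_partial_text_with_spaces_py text_to_replace num_characters_to_replace)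

-- ===== LEMMAS AND PROOFS =====

-- proof-side names for the components of port B
def pvIdxs (l : List Char) : List Int :=
  (PySem.List.enumerate l 0).filterMap (fun p => if p.2 ≠ ' ' ∧ p.2 ≠ '\n' then some p.1 else none)

def pvBlank (idxs : List Int) (n : Int) : PySem.Set Int :=
  if n > 0 then PySem.Set.ofList (PySem.List.slice idxs (some (-n)) none) else PySem.Set.empty

def pvOut (l : List Char) (n : Int) : List Char :=
  (PySem.List.enumerate l 0).map (fun p => if p.1 ∈ pvBlank (pvIdxs l) n then ' ' else p.2)

theorem alt_eq (t : String) (n : Int) :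
    replace_partial_text_with_spaces_py_alt t n = String.ofList (pvOut t.toList n) := rfl

-- A's loop as a structural recursion over the reversed character list
def pvProcA : Int → List Char → List Char
  | _, [] => []
  | n, c :: rest =>
    if (¬ (c = '\n' ∨ c = ' ')) ∧ n > 0 then ' ' :: pvProcA (n - 1) rest
    else c :: pvProcA n rest

theorem foldA (xs : List Char) (n : Int) (acc : List Char) :
    (xs.foldl pvStepA (n, acc)).2 = acc ++ pvProcA n xs := by
  induction xs generalizing n acc with
  | nil => simp [pvProcA]
  | cons c rest ih =>
    simp only [List.foldl, pvStepA, pvProcA]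
    split_ifs with h <;> simp [ih]

theorem mem_pvIdxs {l : List Char} {i : Int} (h : i ∈ pvIdxs l) : 0 ≤ i ∧ i < l.length := by
  simp only [pvIdxs, List.mem_filterMap] at h
  obtain ⟨p, hp, hif⟩ := h
  obtain ⟨k, hk, hpk⟩ := (PySem.List.mem_enumerate_iff _ _ _).1 hp
  subst hpk
  split at hif
  · simp at hif; omega
  · simp at hif

-- membership in B's blank set, uniformly as a trailing drop of the index list
theorem mem_pvBlank (idxs : List Int) (n : Int) (i : Int) :
    i ∈ pvBlank idxs n ↔ i ∈ idxs.drop (idxs.length - n.toNat) := by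
  unfold pvBlank
  by_cases h : n > 0
  · have hn : (0:Nat) < n.toNat := by omega
    have he : -n = -(n.toNat : Int) := by omega
    rw [if_pos h, he, PySem.List.slice_from_neg_natCast _ _ hn, PySem.Set.mem_ofList]
  · have : n.toNat = 0 := by omega
    rw [if_neg h, this]
    simp [PySem.Set.empty]

theorem pvIdxs_append (l : List Char) (c : Char) :
    pvIdxs (l ++ [c]) = pvIdxs l ++ (if c ≠ ' ' ∧ c ≠ '\n' then [(l.length : Int)] else []) := by
  unfold pvIdxs
  rw [PySem.List.enumerate_append, List.filterMap_append]
  congr 1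
  by_cases h : c ≠ ' ' ∧ c ≠ '\n' <;>
    simp [PySem.List.enumerate_cons, PySem.List.enumerate_nil, h]

theorem pvOut_append (l : List Char) (c : Char) (n : Int) :
    pvOut (l ++ [c]) n =
      if (¬ (c = '\n' ∨ c = ' ')) ∧ n > 0 then pvOut l (n - 1) ++ [' ']
      else pvOut l n ++ [c] := by
  have hidx := pvIdxs_append l c
  unfold pvOut
  rw [PySem.List.enumerate_append, List.map_append]
  by_cases hc : c ≠ ' ' ∧ c ≠ '\n'
  · rw [if_pos hc] at hidx
    by_cases hn : n > 0
    · have hcond : (¬ (c = '\n' ∨ c = ' ')) ∧ n > 0 := by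
        refine ⟨?_, hn⟩; intro hco; rcases hco with h1 | h1 <;> simp [h1] at hc
      rw [if_pos hcond]
      have hm : (pvIdxs l ++ [(l.length : Int)]).length = (pvIdxs l).length + 1 := by simp
      congr 1
      · -- the first l.length characters: blank for n on l++[c] agrees with blank for n-1 on l
        apply List.map_congr_left
        intro p hp
        obtain ⟨k, hk, hpk⟩ := (PySem.List.mem_enumerate_iff _ _ _).1 hp
        have hplt : p.1 < (l.length : Int) := by rw [hpk]; simp; omega
        have hiff : p.1 ∈ pvBlank (pvIdxs (l ++ [c])) n ↔ p.1 ∈ pvBlank (pvIdxs l) (n - 1) := by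
          rw [mem_pvBlank, mem_pvBlank, hidx, hm]
          have hle : (pvIdxs l).length + 1 - n.toNat ≤ (pvIdxs l).length := by omega
          rw [List.drop_append_of_le_length hle]
          have hnn : (pvIdxs l).length + 1 - n.toNat = (pvIdxs l).length - (n - 1).toNat := by omega
          rw [hnn]
          constructor
          · intro hmem
            rcases List.mem_append.1 hmem with hmem | hmem
            · exact hmem
            · simp at hmem; omega
          · intro hmem; exact List.mem_append.2 (Or.inl hmem)
        simp only [hiff]
      · -- the last character is blanked
        have hLmem : (l.length : Int) ∈ pvBlank (pvIdxs (l ++ [c])) n := by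
          rw [mem_pvBlank, hidx, hm]
          have hle : (pvIdxs l).length + 1 - n.toNat ≤ (pvIdxs l).length := by omega
          rw [List.drop_append_of_le_length hle]
          exact List.mem_append.2 (Or.inr (by simp))
        simp [PySem.List.enumerate_cons, PySem.List.enumerate_nil, hLmem]
    · -- n ≤ 0: no blanking anywhere
      have hcond : ¬ ((¬ (c = '\n' ∨ c = ' ')) ∧ n > 0) := by tauto
      rw [if_neg hcond]
      have hz : n.toNat = 0 := by omega
      congr 1
      · apply List.map_congr_left
        intro p hp
        have h1 : ¬ p.1 ∈ pvBlank (pvIdxs (l ++ [c])) n := by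
          rw [mem_pvBlank, hz]; simp
        have h2 : ¬ p.1 ∈ pvBlank (pvIdxs l) n := by
          rw [mem_pvBlank, hz]; simp
        rw [if_neg h1, if_neg h2]
      · have h1 : ¬ (l.length : Int) ∈ pvBlank (pvIdxs (l ++ [c])) n := by
          rw [mem_pvBlank, hz]; simp
        simp [PySem.List.enumerate_cons, PySem.List.enumerate_nil, h1]
  · -- c is ' ' or '\n': the index list is unchanged and the last char is never blanked
    rw [if_neg hc] at hidx
    simp only [List.append_nil] at hidx
    have hcond : ¬ ((¬ (c = '\n' ∨ c = ' ')) ∧ n > 0) := by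
      intro hco
      exact hc (by rcases hco with ⟨hne, _⟩; constructor <;> (intro he; exact hne (by simp [he])))
    rw [if_neg hcond]
    congr 1
    · apply List.map_congr_left
      intro p hp
      simp only [hidx]
    · have hnot : ¬ (l.length : Int) ∈ pvBlank (pvIdxs (l ++ [c])) n := by
        rw [mem_pvBlank]
        intro hmem
        have := mem_pvIdxs (l := l ++ [c]) (List.mem_of_mem_drop hmem)
        rw [hidx] at hmem
        have := mem_pvIdxs (l := l) (List.mem_of_mem_drop hmem)
        omega
      simp [PySem.List.enumerate_cons, PySem.List.enumerate_nil, hnot]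

theorem procA_eq_out (l : List Char) (n : Int) :
    pvProcA n l.reverse = (pvOut l n).reverse := by
  induction l using List.reverseRecOn generalizing n with
  | nil => simp [pvProcA, pvOut, PySem.List.enumerate_nil]
  | append_singleton l c ih =>
    have hrev : (l ++ [c]).reverse = c :: l.reverse := by simp
    rw [hrev, pvOut_append]
    simp only [pvProcA]
    split_ifs with h <;> simp [ih]

-- ===== VERDICT (by name: the statement is the Claim_ definition above) =====
theorem replace_partial_text_with_spaces_py_spec : Claim_equal_replace_partial_text_with_spaces_py := by
  intro t n _
  unfold Spec_replace_partial_text_with_spaces_py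
  rw [alt_eq]
  unfold replace_partial_text_with_spaces_py
  simp only [foldA, List.nil_append, procA_eq_out, List.reverse_reverse]
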